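-- pv_equiv track=rewrite | github.com/syedsohailahmedsam/BTC_32_PUZZLE | src/optimized_scanner_ecdsa.py | is_valid_key
-- ===== SOURCE A (Python) =====
-- def is_valid_key(hex_key):
--     """
--     Applies a custom, non-standard validation to the hexadecimal private key.
--     This logic is identical to the one in optimized_scanner_secp256k1.py.
--     """
--     restricted = {'6', '9', 'a', 'd'}
--     double_run_counts = {}
--     count = 1
--
--     for i in range(1, len(hex_key)):
--         curr = hex_key[i]
--         prev = hex_key[i - 1]
--
--         if curr == prev:
--             count += 1
--         else:
--             if count == 2:
--                 double_run_counts[prev] = double_run_counts.get(prev, 0) + 1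
--             count = 1
--
--         if count > 2:
--             return False
--         if curr in restricted and count > 1:
--             return False
--
--     if count == 2:
--         double_run_counts[hex_key[-1]] = double_run_counts.get(hex_key[-1], 0) + 1
--
--     for digit, runs in double_run_counts.items():
--         if runs > 1:
--             return False
--
--     return True
-- ===== SOURCE B (Python) =====
-- def is_valid_key(hex_key):
--     """Two-phase run-length validation: materialize (char, run-length) pairs
--     with an index scan, then validate the runs and count the double-runs."""
--     restricted = ('6', '9', 'a', 'd')
--     runs = []
--     i = 0
--     n = len(hex_key)
--     while i < n:
--         j = i + 1
--         while j < n and hex_key[j] == hex_key[i]: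
--             j += 1
--         runs.append((hex_key[i], j - i))
--         i = j
--     doubles = {}
--     for ch, length in runs:
--         if length > 2 or (length == 2 and ch in restricted):
--             return False
--         if length == 2:
--             doubles[ch] = doubles.get(ch, 0) + 1
--     return all(v <= 1 for v in doubles.values())
-- ===== Notes on version B (the rewrite author's own statement) =====
-- stated objective: alternative
-- what changed: A validates character-by-character with an in-flight run counter and early aborts inside one scan; B first materializes the (char, run-length) pairs with a two-pointer index scan and then validates the run list in a separate pass.
import Mathlib
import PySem

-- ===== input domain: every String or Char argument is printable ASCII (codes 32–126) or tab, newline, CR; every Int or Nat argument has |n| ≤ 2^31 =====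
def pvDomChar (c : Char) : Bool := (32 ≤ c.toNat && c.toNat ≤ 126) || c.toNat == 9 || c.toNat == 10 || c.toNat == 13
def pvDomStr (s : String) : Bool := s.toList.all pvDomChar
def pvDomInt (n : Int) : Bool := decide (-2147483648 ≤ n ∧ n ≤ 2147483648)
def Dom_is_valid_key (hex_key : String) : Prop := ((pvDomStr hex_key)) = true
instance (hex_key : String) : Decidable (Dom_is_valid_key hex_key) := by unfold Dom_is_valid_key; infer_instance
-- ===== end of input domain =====

-- B re-implements the validation as a two-phase pass (materialize the run-length pairs, then
-- validate the runs); objective: alternative decomposition, same asymptotic cost.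

-- ===== PORT A =====
-- restricted = {'6', '9', 'a', 'd'}
def pvRestricted : PySem.Set Char := PySem.Set.ofList ['6', '9', 'a', 'd']

-- the final 'for digit, runs in double_run_counts.items(): if runs > 1: return False' loop
def pvAFinal : List (Char × Int) → Bool
  | [] => true
  | (_, runs) :: rest => if runs > 1 then false else pvAFinal rest

-- the 'for i in range(1, len(hex_key))' loop; prev = hex_key[i-1], the list argument is hex_key[i:].
-- At loop exit prev is the last character, which is what hex_key[-1] denotes there.
def pvALoop (prev : Char) (count : Int) (d : PySem.Dict Char Int) : List Char → Bool
  | [] =>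
      let d' := if count == 2 then d.insert prev (d.getD prev 0 + 1) else d
      pvAFinal d'.items
  | curr :: t =>
      let st := if curr == prev then (count + 1, d)
                else (1, if count == 2 then d.insert prev (d.getD prev 0 + 1) else d)
      if st.1 > 2 then false
      else if PySem.Set.contains pvRestricted curr && st.1 > 1 then false
      else pvALoop curr st.1 st.2 t

def is_valid_key (hex_key : String) : Bool :=
  match hex_key.toList with
  | [] => true
  | c :: t => pvALoop c 1 PySem.Dict.empty t

-- ===== PORT B =====
-- the index scan 'while i < n: j = i+1; while j < n and s[j] == s[i]: j += 1; runs.append((s[i], j-i)); i = j'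
-- (the inner while that advances j over the equal characters is exactly the takeWhile/dropWhile split)
def pvRuns : List Char → List (Char × Int)
  | [] => []
  | c :: t =>
      (c, 1 + ((t.takeWhile (fun x => x == c)).length : Int)) ::
        pvRuns (t.dropWhile (fun x => x == c))
termination_by l => l.length
decreasing_by
  have := List.length_dropWhile_le (fun x => x == c) t
  simp only [List.length_cons]
  omega

-- the 'for ch, length in runs' loop, then 'all(v <= 1 for v in doubles.values())'
def pvBLoop (d : PySem.Dict Char Int) : List (Char × Int) → Bool
  | [] => (PySem.Dict.values d).all (fun v => decide (v ≤ 1))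
  | (ch, len) :: rs =>
      if len > 2 || (len == 2 && List.contains ['6', '9', 'a', 'd'] ch) then false
      else pvBLoop (if len == 2 then d.insert ch (d.getD ch 0 + 1) else d) rs

def is_valid_key_alt (hex_key : String) : Bool :=
  pvBLoop PySem.Dict.empty (pvRuns hex_key.toList)

-- ===== PRECONDITION & SPEC =====
def Spec_is_valid_key (hex_key : String) (out : Bool) : Prop := out = is_valid_key_alt hex_key
instance (hex_key : String) (out : Bool) : Decidable (Spec_is_valid_key hex_key out) := by unfold Spec_is_valid_key; infer_instance

-- ===== CLAIM (what is proved, stated in full; the proofs are below) =====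
def Claim_equal_is_valid_key : Prop := ∀ (hex_key : String), Dom_is_valid_key hex_key → Spec_is_valid_key hex_key (is_valid_key hex_key)

-- ===== LEMMAS AND PROOFS =====

-- A's restricted set is the four-element list B's port tests membership in
theorem pvRestricted_contains (c : Char) :
    PySem.Set.contains pvRestricted c = List.contains ['6', '9', 'a', 'd'] c := by
  rfl

theorem pvRuns_cons (c : Char) (t : List Char) :
    pvRuns (c :: t) =
      (c, 1 + ((t.takeWhile (fun x => x == c)).length : Int)) ::
        pvRuns (t.dropWhile (fun x => x == c)) := by
  rw [pvRuns]

theorem pvRuns_pos : ∀ (t : List Char), ∀ p ∈ pvRuns t, 1 ≤ p.2 := by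
  intro t
  induction t using pvRuns.induct with
  | case1 => intro p hp; simp [pvRuns] at hp
  | case2 c t ih =>
    intro p hp
    rw [pvRuns_cons] at hp
    rcases List.mem_cons.mp hp with hp | hp
    · subst hp; simp
    · exact ih p hp

-- prepend a partial run of length n onto a run list, merging with the first run on the same char
def pvMerge (c : Char) (n : Int) : List (Char × Int) → List (Char × Int)
  | [] => [(c, n)]
  | (c', m) :: rs => if c' == c then (c, n + m) :: rs else (c, n) :: (c', m) :: rs

theorem pvRuns_nil : pvRuns [] = [] := by rw [pvRuns]

theorem pvMerge_merge (c : Char) (n : Int) (L : List (Char × Int)) :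
    pvMerge c n (pvMerge c 1 L) = pvMerge c (n + 1) L := by
  match L with
  | [] => simp [pvMerge]; try ring
  | (c', m) :: rs =>
    by_cases h : c' = c
    · subst h; simp [pvMerge]; try ring
    · simp [pvMerge, h]; try ring

theorem pvMerge_one (c : Char) (t : List Char) :
    pvMerge c 1 (pvRuns t) = pvRuns (c :: t) := by
  match t with
  | [] => simp [pvRuns, pvMerge]
  | x :: t' =>
    by_cases h : x = c
    · subst h
      have h1 : pvRuns (x :: x :: t') =
          (x, 1 + (((x :: t').takeWhile (fun y => y == x)).length : Int)) ::
            pvRuns ((x :: t').dropWhile (fun y => y == x)) := pvRuns_cons x (x :: t')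
      have h2 : pvRuns (x :: t') =
          (x, 1 + ((t'.takeWhile (fun y => y == x)).length : Int)) ::
            pvRuns (t'.dropWhile (fun y => y == x)) := pvRuns_cons x t'
      rw [h1, h2]
      simp [pvMerge, List.takeWhile, List.dropWhile]
      ring
    · have hx : (x == c) = false := by simp [h]
      have h1 : pvRuns (c :: x :: t') = (c, 1) :: pvRuns (x :: t') := by
        rw [pvRuns_cons]
        simp [List.takeWhile, List.dropWhile, hx]
      rw [h1, pvRuns_cons x t']
      simp [pvMerge, h]

theorem pvAFinal_eq (l : List (Char × Int)) :
    pvAFinal l = (l.map Prod.snd).all (fun v => decide (v ≤ 1)) := by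
  induction l with
  | nil => rfl
  | cons p rest ih =>
    obtain ⟨c, v⟩ := p
    by_cases h : v > 1
    · simp [pvAFinal, h]; try omega
    · simp [pvAFinal, h, ih]; try omega

-- evaluated step equations for the two loops
theorem pvALoop_nil (prev : Char) (count : Int) (d : PySem.Dict Char Int) :
    pvALoop prev count d [] =
      pvAFinal (if count == 2 then d.insert prev (d.getD prev 0 + 1) else d).items := rfl

theorem pvALoop_cons_eqc (prev curr : Char) (count : Int) (d : PySem.Dict Char Int)
    (t : List Char) (h : (curr == prev) = true) :
    pvALoop prev count d (curr :: t) =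
      if count + 1 > 2 then false
      else if List.contains ['6', '9', 'a', 'd'] curr && count + 1 > 1 then false
      else pvALoop curr (count + 1) d t := by
  simp only [pvALoop, h, if_true, pvRestricted_contains]

theorem pvALoop_cons_nec (prev curr : Char) (count : Int) (d : PySem.Dict Char Int)
    (t : List Char) (h : (curr == prev) = false) :
    pvALoop prev count d (curr :: t) =
      pvALoop curr 1 (if count == 2 then d.insert prev (d.getD prev 0 + 1) else d) t := by
  simp only [pvALoop, h, pvRestricted_contains]
  norm_num

theorem pvBLoop_nil (d : PySem.Dict Char Int) :
    pvBLoop d [] = (PySem.Dict.values d).all (fun v => decide (v ≤ 1)) := rfl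

theorem pvBLoop_cons (d : PySem.Dict Char Int) (ch : Char) (len : Int) (rs : List (Char × Int)) :
    pvBLoop d ((ch, len) :: rs) =
      if len > 2 || (len == 2 && List.contains ['6', '9', 'a', 'd'] ch) then false
      else pvBLoop (if len == 2 then d.insert ch (d.getD ch 0 + 1) else d) rs := rfl

-- B returns False on a run list whose head run is too long or is a restricted double
theorem pvBLoop_head_bad (d : PySem.Dict Char Int) (ch : Char) (len : Int) (rs : List (Char × Int))
    (h : len > 2 ∨ (len = 2 ∧ List.contains ['6', '9', 'a', 'd'] ch = true)) :
    pvBLoop d ((ch, len) :: rs) = false := by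
  rw [pvBLoop_cons]
  rcases h with h | ⟨h2, hr⟩
  · simp [h]
  · subst h2
    simp only [hr]
    norm_num

-- main loop correspondence: A's in-flight (prev, count) state equals B processing the
-- run list of the remaining input with the partial run merged onto its front
theorem pvMain : ∀ (t : List Char) (prev : Char) (count : Int) (d : PySem.Dict Char Int),
    (count = 1 ∨ (count = 2 ∧ List.contains ['6', '9', 'a', 'd'] prev = false)) →
    pvALoop prev count d t = pvBLoop d (pvMerge prev count (pvRuns t))
  | [], prev, count, d, hinv => by
    rw [pvALoop_nil]
    rw [pvRuns_nil]
    rw [show pvMerge prev count [] = [(prev, count)] from rfl]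
    rw [pvBLoop_cons]
    rcases hinv with h1 | ⟨h2, hr⟩
    · subst h1
      norm_num [pvAFinal_eq, pvBLoop_nil, PySem.Dict.values]
    · subst h2
      simp only [hr]
      norm_num [pvAFinal_eq, pvBLoop_nil, PySem.Dict.values]
  | curr :: t, prev, count, d, hinv => by
    by_cases hc : curr = prev
    · subst hc
      rw [show pvRuns (curr :: t) = pvMerge curr 1 (pvRuns t) from (pvMerge_one curr t).symm,
          pvMerge_merge]
      rw [pvALoop_cons_eqc _ _ _ _ _ (by simp)]
      rcases hinv with h1 | ⟨h2, hr⟩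
      · subst h1
        rw [if_neg (by norm_num : ¬((1:Int) + 1 > 2))]
        by_cases hres : List.contains ['6', '9', 'a', 'd'] curr = true
        · -- A returns False; B's head run has length ≥ 2 on a restricted char
          rw [hres, if_pos (by norm_num)]
          match hrs : pvRuns t with
          | [] =>
            rw [show pvMerge curr (1 + 1) [] = [(curr, 2)] from by norm_num [pvMerge]]
            exact (pvBLoop_head_bad _ _ _ _ (Or.inr ⟨rfl, hres⟩)).symm
          | (c', m) :: rs =>
            have hm : 1 ≤ m := pvRuns_pos t (c', m) (by rw [hrs]; exact List.mem_cons_self)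
            by_cases hcc : c' = curr
            · subst hcc
              rw [show pvMerge c' (1 + 1) ((c', m) :: rs) = (c', 1 + 1 + m) :: rs from by
                simp [pvMerge]]
              exact (pvBLoop_head_bad _ _ _ _ (Or.inl (by omega))).symm
            · rw [show pvMerge curr (1 + 1) ((c', m) :: rs) = (curr, 1 + 1) :: (c', m) :: rs from by
                simp [pvMerge, hcc]]
              exact (pvBLoop_head_bad _ _ _ _ (Or.inr ⟨by norm_num, hres⟩)).symm
        · have hres' : List.contains ['6', '9', 'a', 'd'] curr = false := by
            cases hcon : List.contains ['6', '9', 'a', 'd'] curr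
            · rfl
            · exact absurd hcon hres
          rw [hres', if_neg (by norm_num)]
          rw [pvMain t curr (1 + 1) d (Or.inr ⟨by norm_num, hres'⟩)]
      · -- count = 2: the run grows to 3, both sides return False
        subst h2
        rw [if_pos (by norm_num : (2:Int) + 1 > 2)]
        match hrs : pvRuns t with
        | [] =>
          rw [show pvMerge curr (2 + 1) [] = [(curr, 3)] from by norm_num [pvMerge]]
          exact (pvBLoop_head_bad _ _ _ _ (Or.inl (by norm_num))).symm
        | (c', m) :: rs =>
          have hm : 1 ≤ m := pvRuns_pos t (c', m) (by rw [hrs]; exact List.mem_cons_self)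
          by_cases hcc : c' = curr
          · subst hcc
            rw [show pvMerge c' (2 + 1) ((c', m) :: rs) = (c', 2 + 1 + m) :: rs from by
              simp [pvMerge]]
            exact (pvBLoop_head_bad _ _ _ _ (Or.inl (by omega))).symm
          · rw [show pvMerge curr (2 + 1) ((c', m) :: rs) = (curr, 2 + 1) :: (c', m) :: rs from by
              simp [pvMerge, hcc]]
            exact (pvBLoop_head_bad _ _ _ _ (Or.inl (by norm_num))).symm
    · -- run break: A flushes the double-run counter and restarts with count = 1
      rw [pvALoop_cons_nec _ _ _ _ _ (by simp [hc])]
      rw [pvMain t curr 1 _ (Or.inl rfl), pvMerge_one]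
      have hpm : pvMerge prev count (pvRuns (curr :: t)) = (prev, count) :: pvRuns (curr :: t) := by
        rw [pvRuns_cons]
        simp [pvMerge, hc]
      rw [hpm]
      conv_rhs => rw [pvBLoop_cons]
      rcases hinv with h1 | ⟨h2, hr⟩
      · subst h1; norm_num
      · subst h2; simp only [hr]; norm_num

-- ===== VERDICT (by name: the statement is the Claim_ definition above) =====
theorem is_valid_key_spec : Claim_equal_is_valid_key := by
  intro hex_key _
  unfold Spec_is_valid_key is_valid_key is_valid_key_alt
  match h : hex_key.toList with
  | [] => rw [pvRuns_nil]; rfl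
  | c :: t =>
    show pvALoop c 1 PySem.Dict.empty t = pvBLoop PySem.Dict.empty (pvRuns (c :: t))
    rw [pvMain t c 1 PySem.Dict.empty (Or.inl rfl), pvMerge_one]
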